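-- pv_equiv track=rewrite | github.com/aimehai/aime-ocr | main/extract_table/utils_table.py | merge_single_chars
-- ===== SOURCE A (Python) =====
-- def merge_single_chars(text_list):
--     merge_chars_list = []
--     searched_ids = []
--     for i, src_text in enumerate(text_list):
--         if len(src_text) == 1 and i not in searched_ids:
--             merge_chars_list.append([i])
--             for j, dst_text in enumerate((text_list[i + 1:]), start=(i + 1)):
--                 if len(dst_text) == 1 and j not in searched_ids:
--                     merge_chars_list[(-1)].append(j)
--                     searched_ids.append(j)
--                 else:
--                     break
--
--     adj = 0
--     for merge_chars in merge_chars_list: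
--         if len(merge_chars) >= 2:
--             text_list.insert(merge_chars[0] - adj, ''.join(text_list[merge_chars[0] - adj:merge_chars[(-1)] + 1 - adj]))
--             for i in merge_chars:
--                 if merge_chars[0] - adj + 1 < len(text_list):
--                     text_list.pop(merge_chars[0] - adj + 1)
--
--             adj += len(merge_chars) - 1
--
--     return text_list
-- ===== SOURCE B (Python) =====
-- def merge_single_chars(text_list):
--     # One linear pass: group maximal runs of consecutive single-char strings,
--     # join each run into one string. Mutates text_list in place like A.
--     out = []
--     run = []
--     for s in text_list:
--         if len(s) == 1:
--             run.append(s)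
--         else:
--             if run:
--                 out.append(''.join(run))
--                 run = []
--             out.append(s)
--     if run:
--         out.append(''.join(run))
--     text_list[:] = out
--     return text_list
-- ===== Notes on version B (the rewrite author's own statement) =====
-- stated objective: faster
-- what changed: Replaced A's two-phase scheme (quadratic index-group collection with membership scans over searched_ids, then in-place insert/pop splicing with an offset accumulator) by one linear pass that groups consecutive single-char strings and appends each run's join to a fresh output list.
import Mathlib
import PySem

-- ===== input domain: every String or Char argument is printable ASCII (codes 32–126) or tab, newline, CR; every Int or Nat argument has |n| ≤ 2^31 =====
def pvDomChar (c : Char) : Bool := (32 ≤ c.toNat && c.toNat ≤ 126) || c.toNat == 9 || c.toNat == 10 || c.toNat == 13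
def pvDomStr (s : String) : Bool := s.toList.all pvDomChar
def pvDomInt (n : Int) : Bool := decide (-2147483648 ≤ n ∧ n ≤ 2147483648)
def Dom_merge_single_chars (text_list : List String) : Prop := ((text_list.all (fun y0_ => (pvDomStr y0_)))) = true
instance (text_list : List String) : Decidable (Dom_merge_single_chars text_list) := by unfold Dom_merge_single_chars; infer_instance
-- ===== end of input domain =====

-- B replaces A's quadratic two-phase group-then-splice scheme by one linear grouping pass (return value and final list contents agree; both leave the argument holding the result).

-- ===== PORT A =====
-- inner 'for j, dst_text in enumerate(text_list[i+1:], start=i+1)' loop with break;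
-- state: (searched_ids, current group, j); returns (group, searched_ids)
def mscInner : List Nat → List Nat → Nat → List String → (List Nat × List Nat)
  | searched, group, _, [] => (group, searched)
  | searched, group, j, dst :: rest =>
    if PySem.Str.len dst = 1 ∧ j ∉ searched then
      mscInner (searched ++ [j]) (group ++ [j]) (j + 1) rest
    else (group, searched)

-- outer 'for i, src_text in enumerate(text_list)' loop of phase 1
def mscOuter (full : List String) : Nat → List String → List Nat → List (List Nat) → List (List Nat)
  | _, [], _, mcl => mcl
  | i, src :: rest, searched, mcl =>
    if PySem.Str.len src = 1 ∧ i ∉ searched then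
      let p := mscInner searched [i] (i + 1) (PySem.List.slice full (some ((i : Int) + 1)) none)
      mscOuter full (i + 1) rest p.2 (mcl ++ [p.1])
    else mscOuter full (i + 1) rest searched mcl

-- one iteration of the second 'for merge_chars in merge_chars_list' loop (state: (text_list, adj))
def mscStep (acc : List String × Int) (mc : List Nat) : List String × Int :=
  if 2 ≤ mc.length then
    let lst := acc.1
    let adj := acc.2
    let start : Nat := (PySem.List.pyGet? mc 0).getD 0          -- merge_chars[0]
    let lastIdx : Nat := (PySem.List.pyGet? mc (-1)).getD 0     -- merge_chars[-1]
    let joined := PySem.Str.join "" (PySem.List.slice lst (some ((start : Int) - adj)) (some ((lastIdx : Int) + 1 - adj)))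
    let lst1 := PySem.List.insert lst ((start : Int) - adj) joined
    -- 'for i in merge_chars: if merge_chars[0]-adj+1 < len(text_list): text_list.pop(...)'
    let lst2 := mc.foldl (fun l _ =>
      if ((start : Int) - adj + 1) < PySem.List.len l then
        ((PySem.List.pop? l ((start : Int) - adj + 1)).map (·.2)).getD l
      else l) lst1
    (lst2, adj + (mc.length : Int) - 1)
  else acc

def merge_single_chars (text_list : List String) : List String :=
  let mcl := mscOuter text_list 0 text_list [] []
  (mcl.foldl mscStep (text_list, 0)).1

-- ===== PORT B =====
-- one linear pass; state: (output list, current run of single-char strings)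
def bStep (acc : List String × List String) (s : String) : List String × List String :=
  if PySem.Str.len s = 1 then (acc.1, acc.2 ++ [s])
  else if acc.2 ≠ [] then (acc.1 ++ [PySem.Str.join "" acc.2] ++ [s], [])
  else (acc.1 ++ [s], acc.2)

def merge_single_chars_alt (text_list : List String) : List String :=
  let p := text_list.foldl bStep ([], [])
  if p.2 ≠ [] then p.1 ++ [PySem.Str.join "" p.2] else p.1

-- ===== PRECONDITION & SPEC =====
def Spec_merge_single_chars (text_list : List String) (out : List String) : Prop := out = merge_single_chars_alt text_list
instance (text_list : List String) (out : List String) : Decidable (Spec_merge_single_chars text_list out) := by unfold Spec_merge_single_chars; infer_instance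

-- ===== CLAIM (what is proved, stated in full; the proofs are below) =====
def Claim_equal_merge_single_chars : Prop := ∀ (text_list : List String), Dom_merge_single_chars text_list → Spec_merge_single_chars text_list (merge_single_chars text_list)

-- ===== LEMMAS AND PROOFS =====

-- the single-char test, as a Bool predicate
def sp (s : String) : Bool := decide (PySem.Str.len s = 1)

-- common functional specification: join each maximal run of consecutive single-char strings
def mrg : List String → List String
  | [] => []
  | s :: t =>
    if PySem.Str.len s = 1 then
      PySem.Str.join "" (s :: t.takeWhile sp) :: mrg (t.dropWhile sp)
    else s :: mrg t
termination_by l => l.length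
decreasing_by
  · simpa using Nat.lt_succ_of_le (t.length_dropWhile_le sp)
  · simp

-- groups produced by phase 1 of A, as a direct recursion
def grps : Nat → List String → List (List Nat)
  | _, [] => []
  | i, s :: t =>
    if PySem.Str.len s = 1 then
      List.range' i ((t.takeWhile sp).length + 1) :: grps (i + (t.takeWhile sp).length + 1) (t.dropWhile sp)
    else grps (i + 1) t
termination_by _ l => l.length
decreasing_by
  · simpa using Nat.lt_succ_of_le (t.length_dropWhile_le sp)
  · simp

theorem mscInner_eq (u : List String) : ∀ (searched group : List Nat) (j : Nat),
    (∀ x ∈ searched, x < j) →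
    mscInner searched group j u =
      (group ++ List.range' j (u.takeWhile sp).length,
       searched ++ List.range' j (u.takeWhile sp).length) := by
  induction u with
  | nil => intro searched group j _; simp [mscInner]
  | cons dst rest ih =>
    intro searched group j hlt
    by_cases h1 : PySem.Str.len dst = 1
    · have hnm : j ∉ searched := fun hm => lt_irrefl j (hlt j hm)
      rw [mscInner, if_pos ⟨h1, hnm⟩, ih (searched ++ [j]) (group ++ [j]) (j + 1)
        (by intro x hx; rcases List.mem_append.1 hx with hx | hx
            · exact Nat.lt_succ_of_lt (hlt x hx)
            · simp at hx; omega)]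
      have hsp : sp dst = true := by simp only [sp]; exact decide_eq_true h1
      rw [List.takeWhile_cons, hsp]
      simp [List.range'_succ]
    · have hsp : sp dst = false := by simp only [sp]; exact decide_eq_false h1
      rw [mscInner, if_neg (fun hc => h1 hc.1)]
      rw [List.takeWhile_cons, hsp]
      simp

theorem mscOuter_skip (full : List String) (m : Nat) : ∀ (j : Nat) (searched : List Nat) mcl,
    j + m ≤ full.length →
    (∀ x ∈ searched, x < j + m) → (∀ x, j ≤ x → x < j + m → x ∈ searched) →
    mscOuter full j (full.drop j) searched mcl = mscOuter full (j + m) (full.drop (j + m)) searched mcl := by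
  induction m with
  | zero => intro j searched mcl _ _ _; rfl
  | succ m ih =>
    intro j searched mcl hle hlt hcov
    have hj : j < full.length := by omega
    rw [List.drop_eq_getElem_cons hj, mscOuter,
      if_neg (fun hc => hc.2 (hcov j le_rfl (by omega)))]
    have := ih (j + 1) searched mcl (by omega) (by intro x hx; have := hlt x hx; omega)
      (by intro x h1 h2; exact hcov x (by omega) (by omega))
    have e : j + (m + 1) = (j + 1) + m := by omega
    rw [e]
    exact this

theorem pv_takeWhile_len_le {α : Type} (p : α → Bool) (t : List α) :
    (t.takeWhile p).length ≤ t.length := by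
  induction t with
  | nil => simp
  | cons a l ih =>
    by_cases h : p a
    · simp [h]; omega
    · simp [h]

theorem pv_dropWhile_eq_drop {α : Type} (p : α → Bool) (t : List α) :
    t.dropWhile p = t.drop (t.takeWhile p).length := by
  induction t with
  | nil => simp
  | cons a l ih => by_cases h : p a <;> simp [h, ih]

theorem mscOuter_eq (full : List String) : ∀ (n i : Nat) (searched : List Nat) mcl,
    n = full.length - i →
    (∀ x ∈ searched, x < i) →
    mscOuter full i (full.drop i) searched mcl = mcl ++ grps i (full.drop i) := by
  intro n
  induction n using Nat.strong_induction_on with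
  | _ n ih =>
    intro i searched mcl hn hlt
    by_cases hi : i < full.length
    · rw [List.drop_eq_getElem_cons hi]
      set s := full[i] with hs
      have ht : full.drop (i + 1) = List.drop (i + 1) full := rfl
      by_cases h1 : PySem.Str.len s = 1
      · have hnm : i ∉ searched := fun hm => lt_irrefl i (hlt i hm)
        rw [mscOuter, if_pos ⟨h1, hnm⟩]
        have hcast : (i : Int) + 1 = ((i + 1 : Nat) : Int) := by push_cast; ring
        rw [hcast, PySem.List.slice_from_natCast]
        set t := List.drop (i + 1) full with htdef
        set k := (t.takeWhile sp).length with hk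
        rw [mscInner_eq t searched [i] (i + 1)
          (by intro x hx; exact Nat.lt_succ_of_lt (hlt x hx))]
        have hkt : k ≤ t.length := by
          rw [hk]; exact pv_takeWhile_len_le sp t
        have hklen : i + 1 + k ≤ full.length := by
          have : t.length = full.length - (i + 1) := by rw [htdef]; simp
          omega
        rw [mscOuter_skip full k (i + 1) _ _ hklen
          (by intro x hx
              rcases List.mem_append.1 hx with hx | hx
              · have := hlt x hx; omega
              · have := List.mem_range'_1.1 hx; omega)
          (by intro x hx1 hx2
              exact List.mem_append.2 (Or.inr (List.mem_range'_1.2 ⟨hx1, hx2⟩)))]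
        rw [ih (full.length - (i + 1 + k)) (by omega) (i + 1 + k) _ _ rfl
          (by intro x hx
              rcases List.mem_append.1 hx with hx | hx
              · have := hlt x hx; omega
              · have := List.mem_range'_1.1 hx; omega)]
        rw [grps, if_pos h1]
        rw [pv_dropWhile_eq_drop sp t, ← hk, List.drop_drop]
        have e2 : i + k + 1 = i + 1 + k := by omega
        rw [e2, List.range'_succ]
        simp
      · rw [mscOuter, if_neg (fun hc => h1 hc.1)]
        rw [ih (full.length - (i + 1)) (by omega) (i + 1) _ _ rfl
          (by intro x hx; exact Nat.lt_succ_of_lt (hlt x hx))]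
        rw [grps, if_neg h1]
    · have hd : full.drop i = [] := List.drop_eq_nil_of_le (by omega)
      rw [hd, mscOuter, grps]
      simp

-- iterated pop at a fixed position
theorem popLoop_eq {β : Type} (q : Nat) : ∀ (c : List β) (X : List String),
    q + c.length ≤ X.length →
    c.foldl (fun l _ =>
      if ((q : Int)) < PySem.List.len l then
        ((PySem.List.pop? l (q : Int)).map (·.2)).getD l
      else l) X = X.take q ++ X.drop (q + c.length) := by
  intro c
  induction c with
  | nil => intro X h; simp
  | cons c0 c' ih =>
    intro X h
    simp only [List.length_cons] at h
    have hq : q < X.length := by omega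
    rw [List.foldl_cons]
    have hlen : ((q : Int)) < PySem.List.len X := by
      simp [PySem.List.len]; exact_mod_cast hq
    rw [if_pos hlen, PySem.List.pop?_natCast X q hq]
    simp only [Option.map_some, Option.getD_some]
    rw [ih (X.eraseIdx q) (by rw [List.length_eraseIdx_of_lt hq]; omega)]
    rw [List.eraseIdx_eq_take_drop_succ]
    have hlq : (X.take q).length = q := by simp; omega
    congr 1
    · rw [List.take_append, List.take_take]
      simp [hlq]
    · rw [List.drop_append, List.drop_eq_nil_of_le (by omega), List.nil_append, hlq,
        List.drop_drop]
      congr 1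
      simp only [List.length_cons]; omega

theorem pv_join_singleton (s : String) : PySem.Str.join "" [s] = s := by
  exact String.toList_inj.mp (by simp)

theorem phase2_aux : ∀ (n : Nat) (l pre : List String) (i : Nat) (adj : Int),
    l.length ≤ n →
    (i : Int) - adj = pre.length →
    ((grps i l).foldl mscStep (pre ++ l, adj)).1 = pre ++ mrg l := by
  intro n
  induction n with
  | zero =>
    intro l pre i adj hn _
    have : l = [] := List.length_eq_zero_iff.mp (by omega)
    subst this
    simp [grps, mrg]
  | succ n ih =>
    intro l pre i adj hn hadj
    match l with
    | [] => simp [grps, mrg]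
    | s :: t =>
      by_cases h1 : PySem.Str.len s = 1
      · rw [grps, if_pos h1, mrg, if_pos h1]
        set k := (t.takeWhile sp).length with hk
        set rest := t.dropWhile sp with hrest
        have hrest_len : rest.length ≤ t.length := t.length_dropWhile_le sp
        have hsplit : s :: t = (s :: t.takeWhile sp) ++ rest := by
          rw [hrest, List.cons_append, List.takeWhile_append_dropWhile]
        by_cases hk0 : k = 0
        · have htw : t.takeWhile sp = [] := List.length_eq_zero_iff.mp (by omega)
          have hrt : rest = t := by rw [hrest, pv_dropWhile_eq_drop, ← hk, hk0, List.drop_zero]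
          rw [hk0, List.foldl_cons]
          have hstep : mscStep (pre ++ s :: t, adj) (List.range' i 1) = (pre ++ s :: t, adj) := by
            rw [mscStep]
            simp
          rw [hstep, hrt, htw]
          have e : pre ++ s :: t = (pre ++ [s]) ++ t := by simp
          rw [e, ih t (pre ++ [s]) (i + 0 + 1) adj (by simp at hn ⊢; omega)
            (by simp; omega)]
          simp [pv_join_singleton]
        · -- k ≥ 1 : the group has length k + 1 ≥ 2 and phase 2 splices the run
          rw [List.foldl_cons]
          set P := pre.length with hP
          set run := s :: t.takeWhile sp with hrun
          have hrunlen : run.length = k + 1 := by simp [hrun, hk]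
          set joined := PySem.Str.join "" run with hjoined
          have hstep : mscStep (pre ++ s :: t, adj) (List.range' i (k + 1)) =
              ((pre ++ [joined]) ++ rest, adj + k) := by
            rw [mscStep]
            rw [if_pos (by simp; omega)]
            have hget0 : (PySem.List.pyGet? (List.range' i (k + 1)) 0).getD 0 = i := by
              simp [List.range'_succ, PySem.List.pyGet?, PySem.List.pyIdx?]
            have hgetLast : (PySem.List.pyGet? (List.range' i (k + 1)) (-1)).getD 0 = i + k := by
              simp [PySem.List.pyGet?, PySem.List.pyIdx?]
            simp only [hget0, hgetLast]
            have hposP : (i : Int) - adj = ((P : Nat) : Int) := by rw [hadj]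
            have hpos2 : ((i + k : Nat) : Int) + 1 - adj = ((P + k + 1 : Nat) : Int) := by
              push_cast; omega
            rw [hposP, hpos2, PySem.List.slice_natCast]
            have hdrop : List.drop P (pre ++ s :: t) = s :: t := by
              simp [hP]
            rw [hdrop]
            have htake : List.take (P + k + 1 - P) (s :: t) = run := by
              have e1 : P + k + 1 - P = k + 1 := by omega
              rw [e1, hsplit, List.take_append, List.take_of_length_le (by omega)]
              simp [hrunlen]
            rw [htake, ← hjoined]
            have hins : PySem.List.insert (pre ++ s :: t) ((P : Nat) : Int) joined =
                pre ++ joined :: (s :: t) := by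
              rw [PySem.List.insert_natCast _ P _ (by simp [hP])]
              simp [hP]
            have hcast1 : ((P : Nat) : Int) + 1 = ((P + 1 : Nat) : Int) := by push_cast; ring
            rw [hins, hcast1]
            rw [popLoop_eq (P + 1) (List.range' i (k + 1)) (pre ++ joined :: (s :: t))
              (by rw [hsplit]; simp [hrunlen]; omega)]
            rw [Prod.mk.injEq]
            refine ⟨?_, ?_⟩
            · have e2 : List.take (P + 1) (pre ++ joined :: (s :: t)) = pre ++ [joined] := by
                rw [List.take_append, List.take_of_length_le (by omega)]
                have : P + 1 - pre.length = 1 := by omega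
                rw [this]
                simp
              have e3 : List.drop (P + 1 + (List.range' i (k + 1)).length)
                  (pre ++ joined :: (s :: t)) = rest := by
                rw [List.drop_append, List.drop_eq_nil_of_le (by simp; omega), List.nil_append]
                have : P + 1 + (List.range' i (k + 1)).length - pre.length = k + 2 := by
                  simp; omega
                rw [this, hsplit]
                have : joined :: ((s :: List.takeWhile sp t) ++ rest) =
                    (joined :: s :: List.takeWhile sp t) ++ rest := by simp
                rw [this, List.drop_append]
                have hlen2 : (joined :: s :: List.takeWhile sp t).length = k + 2 := by
                  simp [hk]
                rw [List.drop_eq_nil_of_le (by omega), List.nil_append, hlen2]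
                simp
              rw [e2, e3]
            · simp; omega
          rw [hstep]
          have e4 : pre ++ [joined] = (pre ++ [joined]) := rfl
          rw [ih rest (pre ++ [joined]) (i + k + 1) (adj + k)
            (by simp at hn ⊢; omega)
            (by simp; omega)]
          simp
      · rw [grps, if_neg h1, mrg, if_neg h1]
        have e : pre ++ s :: t = (pre ++ [s]) ++ t := by simp
        rw [e, ih t (pre ++ [s]) (i + 1) adj (by simp at hn ⊢; omega)
          (by simp; omega)]
        simp

theorem foldB : ∀ (l out run : List String),
    (let p := l.foldl bStep (out, run);
     if p.2 ≠ [] then p.1 ++ [PySem.Str.join "" p.2] else p.1) =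
    (if run = [] then out ++ mrg l
     else out ++ PySem.Str.join "" (run ++ l.takeWhile sp) :: mrg (l.dropWhile sp)) := by
  intro l
  induction l with
  | nil =>
    intro out run
    by_cases hr : run = [] <;> simp [mrg, hr]
  | cons s t ih =>
    intro out run
    by_cases h1 : PySem.Str.len s = 1
    · have hsp : sp s = true := by simp only [sp]; exact decide_eq_true h1
      rw [List.foldl_cons]
      have hb : bStep (out, run) s = (out, run ++ [s]) := by rw [bStep, if_pos h1]
      rw [hb, ih out (run ++ [s])]
      rw [if_neg (by simp)]
      by_cases hr : run = []
      · rw [if_pos hr, hr]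
        rw [mrg, if_pos h1]
        simp
      · rw [if_neg hr]
        simp [hsp]
    · have hsp : sp s = false := by simp only [sp]; exact decide_eq_false h1
      rw [List.foldl_cons]
      by_cases hr : run = []
      · have hb : bStep (out, run) s = (out ++ [s], run) := by
          rw [bStep, if_neg h1, if_neg (by simp [hr])]
        rw [hb, ih (out ++ [s]) run, if_pos hr, if_pos hr]
        conv_rhs => rw [mrg]
        rw [if_neg h1]
        simp
      · have hb : bStep (out, run) s = (out ++ [PySem.Str.join "" run] ++ [s], []) := by
          rw [bStep, if_neg h1, if_pos (by simp [hr])]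
        rw [hb, ih (out ++ [PySem.Str.join "" run] ++ [s]) [], if_pos rfl, if_neg hr]
        rw [List.takeWhile_cons_of_neg (by simp [hsp]),
          List.dropWhile_cons_of_neg (by simp [hsp])]
        conv_rhs => rw [mrg]
        rw [if_neg h1]
        simp

theorem altB_eq (l : List String) : merge_single_chars_alt l = mrg l := by
  have h := foldB l [] []
  simpa [merge_single_chars_alt] using h

-- ===== VERDICT (by name: the statement is the Claim_ definition above) =====
theorem merge_single_chars_spec : Claim_equal_merge_single_chars := by
  intro l _
  show merge_single_chars l = merge_single_chars_alt l
  rw [altB_eq]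
  show ((mscOuter l 0 l [] []).foldl mscStep (l, 0)).1 = mrg l
  have h1 : mscOuter l 0 (l.drop 0) [] [] = [] ++ grps 0 (l.drop 0) :=
    mscOuter_eq l (l.length - 0) 0 [] [] rfl (by simp)
  simp only [List.drop_zero, List.nil_append] at h1
  rw [h1]
  simpa using phase2_aux l.length l [] 0 0 le_rfl (by simp)
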